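-- pv_equiv track=rewrite | github.com/jayantmadugula/aspect_detection_models | absa_code/preprocessing/absa_parsing.py | pull_target
-- ===== SOURCE A (Python) =====
-- from string import punctuation
--
-- def pull_target(sentence, i, n=2):
--     '''
--     Returns the `i`-th word in `sentence` surrounded by `n` words on either side.
--
--     Returned string has length `2n+1`.
--     '''
--     c_i = i
--     count = 0
--     sent_list =  sentence.split(' ')
--     for w_i, word in enumerate(sent_list):
--         if len(word) + count < c_i: count += len(word) + 1
--         else:
--             # Padding, p_n prepends, a_n appends
--             padding = 'inv'
--             p_n = 0
--             a_n = 0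
--
--             # Find window range [k:l]
--             if w_i - n < 0:
--                 p_n = 0 - (w_i - n)
--                 k = 0
--             else: k = w_i - n
--
--             if w_i + n > len(sent_list) - 1:
--                 a_n = (w_i + n) - len(sent_list) + 1
--                 l = len(sent_list)
--             else: l = w_i + n + 1
--
--             # Format and return target word with window
--             target = sent_list[k:l]
--             target = [padding]*p_n + target + [padding]*a_n
--             return str(target).strip(punctuation) if len(target) == 1 else ' '.join([t.strip(punctuation) for t in target]).strip(punctuation)
-- ===== SOURCE B (Python) =====
-- from string import punctuation
-- from bisect import bisect_right
--
-- def pull_target(sentence, i, n=2):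
--     '''
--     Returns the `i`-th word in `sentence` surrounded by `n` words on either side.
--
--     Locates the word by binary search over a precomputed table of cumulative
--     character end-offsets instead of a linear scan.
--     '''
--     sent_list = sentence.split(' ')
--     m = len(sent_list)
--     ends = []
--     total = 0
--     for word in sent_list:
--         total += len(word) + 1
--         ends.append(total)  # ends[w] = chars up to and including word w (+ separators)
--     w_i = bisect_right(ends, i)
--     if w_i == m:
--         return None
--     k = max(w_i - n, 0)
--     l = min(w_i + n + 1, m)
--     p_n = max(n - w_i, 0)
--     a_n = max(w_i + n + 1 - m, 0)
--     target = ['inv'] * p_n + sent_list[k:l] + ['inv'] * a_n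
--     if len(target) == 1:
--         return str(target).strip(punctuation)
--     return ' '.join(t.strip(punctuation) for t in target).strip(punctuation)
-- ===== Notes on version B (the rewrite author's own statement) =====
-- stated objective: alternative
-- what changed: The target word is located by precomputing a table of cumulative character end-offsets and binary-searching it with bisect_right, instead of A's linear loop that threads a running character count; the window/padding formatting uses max/min arithmetic instead of A's branch assignments.
import Mathlib
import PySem

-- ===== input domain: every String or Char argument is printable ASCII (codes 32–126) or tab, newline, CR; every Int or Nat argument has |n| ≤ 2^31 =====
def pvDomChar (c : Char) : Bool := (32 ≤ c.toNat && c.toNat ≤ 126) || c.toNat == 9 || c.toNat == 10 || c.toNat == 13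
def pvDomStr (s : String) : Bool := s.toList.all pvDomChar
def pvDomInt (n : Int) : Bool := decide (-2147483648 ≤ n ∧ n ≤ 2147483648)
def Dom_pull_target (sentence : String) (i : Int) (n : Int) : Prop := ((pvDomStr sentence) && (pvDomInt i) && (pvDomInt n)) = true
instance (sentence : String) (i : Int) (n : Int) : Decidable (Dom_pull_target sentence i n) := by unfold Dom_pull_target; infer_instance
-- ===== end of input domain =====

-- B locates the target word by binary search over a precomputed table of cumulative character
-- end-offsets instead of A's linear counting loop (objective: alternative decomposition); the
-- window/padding formatting of the located word is the same. Return values agree everywhere.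

-- string.punctuation
def pvPunct : String := "!\"#$%&'()*+,-./:;<=>?@[\\]^_`{|}~"

-- repr(s) for a Python str: quote choice and escaping; exact for printable ASCII plus tab/newline/CR
def pvReprQuote (cs : List Char) : Char :=
  if cs.contains '\'' && !(cs.contains '"') then '"' else '\''

def pvEscChar (q c : Char) : List Char :=
  if c = '\\' then ['\\', '\\']
  else if c = q then ['\\', q]
  else if c = Char.ofNat 9 then ['\\', 't']
  else if c = Char.ofNat 10 then ['\\', 'n']
  else if c = Char.ofNat 13 then ['\\', 'r']
  else [c]

def pvPyRepr (s : String) : String :=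
  let cs := s.toList
  let q := pvReprQuote cs
  String.ofList ([q] ++ cs.flatMap (pvEscChar q) ++ [q])

-- str(target) for a Python list of str (both sources evaluate it only on 1-element lists)
def pvPyStrList (xs : List String) : String :=
  "[" ++ PySem.Str.join ", " (xs.map pvPyRepr) ++ "]"

-- ===== PORT A =====
-- the 'else' branch of A's loop: window bounds, padding, formatting (branch-assigned k/l/p_n/a_n)
def pvFormatA (sent_list : List String) (n : Int) (w_i : Nat) : String :=
  let m : Int := sent_list.length
  let p_n : Int := if (w_i : Int) - n < 0 then 0 - ((w_i : Int) - n) else 0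
  let k : Int := if (w_i : Int) - n < 0 then 0 else (w_i : Int) - n
  let a_n : Int := if (w_i : Int) + n > m - 1 then ((w_i : Int) + n) - m + 1 else 0
  let l : Int := if (w_i : Int) + n > m - 1 then m else (w_i : Int) + n + 1
  let target := PySem.List.slice sent_list (some k) (some l)
  let target := PySem.List.pyRepeat ["inv"] p_n ++ target ++ PySem.List.pyRepeat ["inv"] a_n
  if target.length = 1 then PySem.Str.stripChars (pvPyStrList target) pvPunct
  else PySem.Str.stripChars
        (PySem.Str.join " " (target.map (fun t => PySem.Str.stripChars t pvPunct))) pvPunct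

-- A's 'for w_i, word in enumerate(sent_list)' with the running character count
def pvLoopA (sent_list : List String) (i n : Int) :
    List String → Nat → Int → Option String
  | [], _, _ => none
  | word :: rest, w_i, count =>
    if PySem.Str.len word + count < i then
      pvLoopA sent_list i n rest (w_i + 1) (count + PySem.Str.len word + 1)
    else some (pvFormatA sent_list n w_i)

def pull_target (sentence : String) (i : Int) (n : Int) : Option String :=
  -- sentence.split(' '): sep is the nonempty literal " ", so split? is always `some`
  let sent_list := (PySem.Str.split? sentence " ").getD []
  pvLoopA sent_list i n sent_list 0 0

-- ===== PORT B =====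
-- cumulative end-offsets: ends[w] = characters (incl. separators) up to and including word w
def pvEnds (ws : List String) (total : Int) : List Int :=
  match ws with
  | [] => []
  | w :: rest => (total + PySem.Str.len w + 1) :: pvEnds rest (total + PySem.Str.len w + 1)

-- bisect.bisect_right; a[mid] ported as getD (mid < hi ≤ a.length at every probe)
def pvBisect (a : List Int) (x : Int) (lo hi : Nat) : Nat :=
  if lo < hi then
    if x < a.getD ((lo + hi) / 2) 0 then pvBisect a x lo ((lo + hi) / 2)
    else pvBisect a x ((lo + hi) / 2 + 1) hi
  else lo
termination_by hi - lo
decreasing_by all_goals omega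

def pvFormatB (sent_list : List String) (n : Int) (w_i : Nat) : String :=
  let m : Int := sent_list.length
  let k : Int := max ((w_i : Int) - n) 0
  let l : Int := min ((w_i : Int) + n + 1) m
  let p_n : Int := max (n - (w_i : Int)) 0
  let a_n : Int := max ((w_i : Int) + n + 1 - m) 0
  let target := PySem.List.pyRepeat ["inv"] p_n ++ PySem.List.slice sent_list (some k) (some l)
                  ++ PySem.List.pyRepeat ["inv"] a_n
  if target.length = 1 then PySem.Str.stripChars (pvPyStrList target) pvPunct
  else PySem.Str.stripChars
        (PySem.Str.join " " (target.map (fun t => PySem.Str.stripChars t pvPunct))) pvPunct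

def pull_target_alt (sentence : String) (i : Int) (n : Int) : Option String :=
  let sent_list := (PySem.Str.split? sentence " ").getD []
  let ends := pvEnds sent_list 0
  let w_i := pvBisect ends i 0 ends.length
  if w_i = sent_list.length then none
  else some (pvFormatB sent_list n w_i)

-- ===== PRECONDITION & SPEC =====
def Spec_pull_target (sentence : String) (i : Int) (n : Int) (out : Option String) : Prop := out = pull_target_alt sentence i n
instance (sentence : String) (i : Int) (n : Int) (out : Option String) : Decidable (Spec_pull_target sentence i n out) := by unfold Spec_pull_target; infer_instance

-- ===== CLAIM (what is proved, stated in full; the proofs are below) =====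
def Claim_equal_pull_target : Prop := ∀ (sentence : String) (i : Int) (n : Int), Dom_pull_target sentence i n → Spec_pull_target sentence i n (pull_target sentence i n)

-- ===== LEMMAS AND PROOFS =====

-- the two formatters agree: each branch-assigned quantity of A equals B's max/min form
lemma pvFormat_eq (sent_list : List String) (n : Int) (w_i : Nat) :
    pvFormatA sent_list n w_i = pvFormatB sent_list n w_i := by
  have hk : (if (w_i : Int) - n < 0 then 0 else (w_i : Int) - n) = max ((w_i : Int) - n) 0 := by
    split <;> omega
  have hp : (if (w_i : Int) - n < 0 then 0 - ((w_i : Int) - n) else 0)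
      = max (n - (w_i : Int)) 0 := by split <;> omega
  have hl : (if (w_i : Int) + n > (sent_list.length : Int) - 1 then (sent_list.length : Int)
        else (w_i : Int) + n + 1) = min ((w_i : Int) + n + 1) (sent_list.length : Int) := by
    split <;> omega
  have ha : (if (w_i : Int) + n > (sent_list.length : Int) - 1
        then ((w_i : Int) + n) - (sent_list.length : Int) + 1 else 0)
      = max ((w_i : Int) + n + 1 - (sent_list.length : Int)) 0 := by split <;> omega
  simp only [pvFormatA, pvFormatB, hk, hp, hl, ha]

lemma pvStrLen_nonneg (s : String) : 0 ≤ PySem.Str.len s := by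
  simp [PySem.Str.len]

lemma pvEnds_lt (ws : List String) (t : Int) : ∀ e ∈ pvEnds ws t, t < e := by
  induction ws generalizing t with
  | nil => simp [pvEnds]
  | cons w rest ih =>
    intro e he
    have h0 := pvStrLen_nonneg w
    simp only [pvEnds, List.mem_cons] at he
    rcases he with h | h
    · omega
    · have := ih (t + PySem.Str.len w + 1) e h; omega

lemma pvEnds_pairwise (ws : List String) (t : Int) :
    List.Pairwise (· < ·) (pvEnds ws t) := by
  induction ws generalizing t with
  | nil => simp [pvEnds]
  | cons w rest ih =>
    simp only [pvEnds]
    exact List.Pairwise.cons (fun e he => pvEnds_lt _ _ e he) (ih _)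

lemma getD_mono (es : List Int) (hs : List.Pairwise (· < ·) es) {i j : Nat}
    (hij : i ≤ j) (hj : j < es.length) : es.getD i 0 ≤ es.getD j 0 := by
  rcases Nat.eq_or_lt_of_le hij with h | h
  · subst h; rfl
  · rw [List.getD_eq_getElem es 0 (Nat.lt_trans h hj), List.getD_eq_getElem es 0 hj]
    exact le_of_lt (List.pairwise_iff_getElem.mp hs i j (Nat.lt_trans h hj) hj h)

-- firstGT es x: the index of the first element of es exceeding x (es.length if none)
def firstGT (es : List Int) (x : Int) : Nat :=
  match es with
  | [] => 0
  | e :: rest => if x < e then 0 else firstGT rest x + 1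

lemma firstGT_le_length (es : List Int) (x : Int) : firstGT es x ≤ es.length := by
  induction es with
  | nil => simp [firstGT]
  | cons e rest ih => simp only [firstGT, List.length_cons]; split <;> omega

lemma firstGT_before (es : List Int) (x : Int) :
    ∀ j, j < firstGT es x → es.getD j 0 ≤ x := by
  induction es with
  | nil => simp [firstGT]
  | cons e rest ih =>
    intro j hj
    by_cases hx : x < e
    · simp [firstGT, hx] at hj
    · cases j with
      | zero => simp only [List.getD_cons_zero]; omega
      | succ j' =>
        simp only [firstGT, if_neg hx] at hj
        simp only [List.getD_cons_succ]
        exact ih j' (by omega)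

lemma firstGT_at (es : List Int) (x : Int) (h : firstGT es x < es.length) :
    x < es.getD (firstGT es x) 0 := by
  induction es with
  | nil => simp [firstGT] at h
  | cons e rest ih =>
    by_cases hx : x < e
    · simp [firstGT, hx]
    · simp only [firstGT, if_neg hx, List.length_cons, List.getD_cons_succ] at h ⊢
      exact ih (by omega)

-- bisect_right on a strictly increasing list returns the first index whose value exceeds x
theorem pvBisect_eq (es : List Int) (x : Int) (hs : List.Pairwise (· < ·) es)
    (lo hi : Nat) (hlo : lo ≤ hi) (hhi : hi ≤ es.length)
    (H1 : ∀ j, j < lo → es.getD j 0 ≤ x)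
    (H2 : ∀ j, hi ≤ j → j < es.length → x < es.getD j 0) :
    pvBisect es x lo hi = firstGT es x := by
  rw [pvBisect]
  by_cases h : lo < hi
  · rw [if_pos h]
    by_cases hx : x < es.getD ((lo + hi) / 2) 0
    · rw [if_pos hx]
      exact pvBisect_eq es x hs lo ((lo + hi) / 2) (by omega) (by omega) H1
        (fun j hj1 hj2 => lt_of_lt_of_le hx (getD_mono es hs hj1 hj2))
    · rw [if_neg hx]
      refine pvBisect_eq es x hs ((lo + hi) / 2 + 1) hi (by omega) hhi (fun j hj => ?_) H2
      have hm : (lo + hi) / 2 < es.length := by omega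
      have := getD_mono es hs (i := j) (j := (lo + hi) / 2) (by omega) hm
      omega
  · rw [if_neg h]
    have hlh : lo = hi := by omega
    subst hlh
    rcases lt_trichotomy lo (firstGT es x) with hc | hc | hc
    · exact absurd (H2 lo (le_refl lo) (by have := firstGT_le_length es x; omega))
        (by have := firstGT_before es x lo hc; omega)
    · exact hc
    · exact absurd (firstGT_at es x (by omega)) (by have := H1 _ hc; omega)
termination_by hi - lo
decreasing_by all_goals omega

-- A's loop, started at offset w_i with running count, is firstGT on the remaining end-offsets
lemma pvLoopA_eq (sent_list : List String) (i n : Int) :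
    ∀ (rest : List String) (w_i : Nat) (count : Int),
      pvLoopA sent_list i n rest w_i count =
        (if firstGT (pvEnds rest count) i = rest.length then none
         else some (pvFormatA sent_list n (w_i + firstGT (pvEnds rest count) i))) := by
  intro rest
  induction rest with
  | nil => intro w_i count; simp [pvLoopA, pvEnds, firstGT]
  | cons word tail ih =>
    intro w_i count
    simp only [pvLoopA, pvEnds, firstGT, List.length_cons]
    by_cases h : PySem.Str.len word + count < i
    · rw [if_pos h, if_neg (by omega : ¬ i < count + PySem.Str.len word + 1), ih]
      by_cases he : firstGT (pvEnds tail (count + PySem.Str.len word + 1)) i = tail.length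
      · rw [if_pos he, if_pos (by omega)]
      · rw [if_neg he, if_neg (by omega)]
        congr 2
        omega
    · rw [if_neg h, if_pos (by omega : i < count + PySem.Str.len word + 1), if_neg (by omega)]
      congr 2

-- ===== VERDICT (by name: the statement is the Claim_ definition above) =====
theorem pull_target_spec : Claim_equal_pull_target := by
  intro sentence i n _
  simp only [Spec_pull_target, pull_target, pull_target_alt]
  rw [pvLoopA_eq,
      pvBisect_eq _ i (pvEnds_pairwise _ 0) 0 _
        (Nat.zero_le _) (le_refl _)
        (fun j hj => absurd hj (Nat.not_lt_zero j))
        (fun j h1 h2 => absurd h2 (Nat.not_lt.mpr h1))]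
  by_cases h : firstGT (pvEnds ((PySem.Str.split? sentence " ").getD []) 0) i = ((PySem.Str.split? sentence " ").getD []).length
  · rw [if_pos h, if_pos h]
  · rw [if_neg h, if_neg h, Nat.zero_add, pvFormat_eq]
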